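-- pv_equiv track=rewrite | github.com/GitMonsters/octotetrahedral-agi | re_arc_bench_solves/07120f9f.py | transform
-- ===== SOURCE A (Python) =====
-- def transform(grid):
--     import copy
--     rows = len(grid)
--     cols = len(grid[0])
--     result = copy.deepcopy(grid)
--
--     # Find background color (most common) and marker (different color in row 0)
--     background = grid[0][0]
--     marker_col = -1
--     marker_color = -1
--
--     for c in range(cols):
--         if grid[0][c] != background:
--             marker_col = c
--             marker_color = grid[0][c]
--             break
--
--     if marker_col == -1:
--         return result
--
--     # Draw vertical stripes every 2 columns from marker_col to right edge
--     stripe_cols = []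
--     for c in range(marker_col, cols, 2):
--         stripe_cols.append(c)
--         for r in range(rows):
--             result[r][c] = marker_color
--
--     # Every 4 columns from marker (0th, 2nd, 4th stripe...), add horizontal caps
--     # at row 0 and row (rows-1), extending to the right by 2 cells
--     for i, c in enumerate(stripe_cols):
--         if i % 2 == 0:  # every other stripe (0, 2, 4...)
--             # Top cap: fill positions c+1, c+2 if in bounds (row 0)
--             # But only c+1 since c+2 is already a stripe
--             # Actually looking at pattern: at these positions, also mark c+1
--             if c + 1 < cols:
--                 result[0][c + 1] = marker_color
--             if c + 2 < cols:
--                 result[0][c + 2] = marker_color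
--             # Bottom cap
--             if c + 1 < cols:
--                 result[rows - 1][c + 1] = marker_color
--             if c + 2 < cols:
--                 result[rows - 1][c + 2] = marker_color
--
--     return result
-- ===== SOURCE B (Python) =====
-- def transform(grid):
--     rows = len(grid)
--     row0 = grid[0]
--     cols = len(row0)
--     background = row0[0]
--     m = next((c for c, v in enumerate(row0) if v != background), -1)
--     if m == -1:
--         return [row[:] for row in grid]
--     mc = row0[m]
--     out = []
--     for r, row in enumerate(grid):
--         new = []
--         for c, v in enumerate(row):
--             d = c - m
--             if d >= 0 and d % 2 == 0 and c < cols: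
--                 new.append(mc)
--             elif (r == 0 or r == rows - 1) and d >= 1 and (d - 1) % 4 == 0 and c < cols:
--                 new.append(mc)
--             else:
--                 new.append(v)
--         out.append(new)
--     return out
-- ===== Notes on version B (the rewrite author's own statement) =====
-- stated objective: alternative
-- what changed: B computes each output cell directly from a closed-form stripe/cap predicate on (row, col) in a single pass, instead of deep-copying the grid and then imperatively overwriting stripe columns and cap cells.
import Mathlib
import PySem

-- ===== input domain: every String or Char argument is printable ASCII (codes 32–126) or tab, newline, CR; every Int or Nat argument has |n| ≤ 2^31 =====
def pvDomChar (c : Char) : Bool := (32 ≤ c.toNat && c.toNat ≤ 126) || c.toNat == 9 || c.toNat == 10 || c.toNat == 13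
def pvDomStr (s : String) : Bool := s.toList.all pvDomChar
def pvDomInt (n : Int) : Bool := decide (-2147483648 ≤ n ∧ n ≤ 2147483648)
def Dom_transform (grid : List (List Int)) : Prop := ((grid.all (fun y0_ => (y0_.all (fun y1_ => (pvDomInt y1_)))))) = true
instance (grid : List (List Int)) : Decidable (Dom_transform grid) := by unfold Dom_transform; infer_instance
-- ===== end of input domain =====

-- B builds every output cell from a closed-form stripe/cap predicate in one pass instead of
-- A's deep-copy-then-overwrite (objective: alternative decomposition, same asymptotic cost).

-- ===== PORT A =====
-- result[r][c] = v  (Python's two-level indexed assignment; indices here are always ≥ 0)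
def pvSet2 (g : List (List Int)) (r c : Int) (v : Int) : List (List Int) :=
  PySem.List.pySetD g r (PySem.List.pySetD (PySem.List.pyGetD g r []) c v)

-- A's marker-search loop with break: first c in the range with grid[0][c] != background
def pvFindMarker (row0 : List Int) (background : Int) : List Int → Int × Int
  | [] => (-1, -1)
  | c :: rest =>
    if PySem.List.pyGetD row0 c 0 ≠ background then (c, PySem.List.pyGetD row0 c 0)
    else pvFindMarker row0 background rest

-- body of A's stripe loop: append c to stripe_cols, then set result[r][c] for r in range(rows)
def pvStripeStep (rows mc : Int) (acc : List Int × List (List Int)) (c : Int) :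
    List Int × List (List Int) :=
  (acc.1 ++ [c], (PySem.List.pyRange 0 rows 1).foldl (fun res r => pvSet2 res r c mc) acc.2)

-- body of A's cap loop: the four guarded writes at rows 0 and rows-1
def pvCapStep (rows cols mc : Int) (res : List (List Int)) (ic : Int × Int) : List (List Int) :=
  if ic.1 % 2 = 0 then
    let res := if ic.2 + 1 < cols then pvSet2 res 0 (ic.2 + 1) mc else res
    let res := if ic.2 + 2 < cols then pvSet2 res 0 (ic.2 + 2) mc else res
    let res := if ic.2 + 1 < cols then pvSet2 res (rows - 1) (ic.2 + 1) mc else res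
    if ic.2 + 2 < cols then pvSet2 res (rows - 1) (ic.2 + 2) mc else res
  else res

def transform (grid : List (List Int)) : List (List Int) :=
  let rows : Int := grid.length
  let row0 := PySem.List.pyGetD grid 0 []
  let cols : Int := row0.length
  let result := grid
  let background := PySem.List.pyGetD row0 0 0
  let mk := pvFindMarker row0 background (PySem.List.pyRange 0 cols 1)
  if mk.1 = -1 then result
  else
    let sr := (PySem.List.pyRange mk.1 cols 2).foldl (pvStripeStep rows mk.2) ([], result)
    (PySem.List.enumerate sr.1).foldl (pvCapStep rows cols mk.2) sr.2

-- ===== PORT B =====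
def transform_alt (grid : List (List Int)) : List (List Int) :=
  let rows : Int := grid.length
  let row0 := grid.headD []
  let cols : Int := row0.length
  let background := row0.headD 0
  match row0.findIdx? (fun v => v != background) with
  | none => grid.map (fun row => row)
  | some mN =>
    let m : Int := mN
    let mc := row0.getD mN 0
    (PySem.List.enumerate grid).map (fun rrow =>
      (PySem.List.enumerate rrow.2).map (fun cv =>
        let d := cv.1 - m
        if 0 ≤ d ∧ d % 2 = 0 ∧ cv.1 < cols then mc
        else if (rrow.1 = 0 ∨ rrow.1 = rows - 1) ∧ 1 ≤ d ∧ (d - 1) % 4 = 0 ∧ cv.1 < cols then mc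
        else cv.2))

-- ===== PRECONDITION & SPEC =====
-- Pre_ excludes the empty grid and a grid whose first row is empty (A raises IndexError
-- reading grid[0][0]) and, when a marker exists in row 0, ragged grids having a row shorter
-- than the first row: on those A's stripe/cap writes raise IndexError, except for a few
-- ragged grids on which every write happens to land in bounds, which are excluded with them.
def Pre_transform (grid : List (List Int)) : Prop :=
  grid ≠ [] ∧ grid.headD [] ≠ [] ∧
  ((∃ x ∈ grid.headD [], x ≠ (grid.headD []).headD 0) →
    ∀ row ∈ grid, (grid.headD []).length ≤ row.length)
instance (grid : List (List Int)) : Decidable (Pre_transform grid) := by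
  unfold Pre_transform; infer_instance

def pvWitness_transform : List (List Int) := [[1, 2], [1, 1]]

def Spec_transform (grid : List (List Int)) (out : List (List Int)) : Prop := out = transform_alt grid
instance (grid : List (List Int)) (out : List (List Int)) : Decidable (Spec_transform grid out) := by unfold Spec_transform; infer_instance

-- ===== CLAIM (what is proved, stated in full; the proofs are below) =====
def Claim_equal_transform : Prop := ∀ (grid : List (List Int)), Dom_transform grid → Pre_transform grid → Spec_transform grid (transform grid)

-- ===== LEMMAS AND PROOFS =====

-- total read result[r][c] with Nat indices
def pvGet2 (g : List (List Int)) (r c : Nat) : Int := (g.getD r []).getD c 0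

-- apply a list of (row, col) writes of the single value v
def pvApplyWrites (ps : List (Int × Int)) (v : Int) (g : List (List Int)) : List (List Int) :=
  ps.foldl (fun g p => pvSet2 g p.1 p.2 v) g

-- the writes performed by A's stripe loop / cap loop, as explicit write lists
def pvStripeW (rows cols m : Int) : List (Int × Int) :=
  (PySem.List.pyRange m cols 2).flatMap (fun c => (PySem.List.pyRange 0 rows 1).map (fun r => (r, c)))

def pvCapS (rows cols : Int) (ic : Int × Int) : List (Int × Int) :=
  if ic.1 % 2 = 0 then
    (if ic.2 + 1 < cols then [((0 : Int), ic.2 + 1)] else []) ++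
    (if ic.2 + 2 < cols then [((0 : Int), ic.2 + 2)] else []) ++
    (if ic.2 + 1 < cols then [(rows - 1, ic.2 + 1)] else []) ++
    (if ic.2 + 2 < cols then [(rows - 1, ic.2 + 2)] else [])
  else []

def pvCapW (rows cols m : Int) : List (Int × Int) :=
  (PySem.List.enumerate (PySem.List.pyRange m cols 2)).flatMap (pvCapS rows cols)

theorem pvGetD_set {α : Type} (l : List α) (i j : Nat) (a d : α) :
    (l.set i a).getD j d = if i = j ∧ j < l.length then a else l.getD j d := by
  simp only [List.getD, List.getElem?_set]
  by_cases h : i = j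
  · subst h
    by_cases h2 : i < l.length
    · simp [h2]
    · rw [List.getElem?_eq_none (by omega)]
      simp [h2]
  · simp [h]

theorem rowlen_pvSet2 (g : List (List Int)) (r c : Int) (v : Int) (hr : 0 ≤ r) (r' : Nat) :
    ((pvSet2 g r c v).getD r' []).length = (g.getD r' []).length := by
  unfold pvSet2
  rw [PySem.List.pySetD_of_nonneg _ _ hr, PySem.List.pyGetD_of_nonneg _ _ hr, pvGetD_set]
  split_ifs with h
  · rw [PySem.List.length_pySetD, h.1]
  · rfl

theorem pvGet2_pvSet2 (g : List (List Int)) (r c : Int) (v : Int)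
    (hr : 0 ≤ r) (hc : 0 ≤ c) (r' c' : Nat) :
    pvGet2 (pvSet2 g r c v) r' c' =
      if r = (r' : Int) ∧ c = (c' : Int) ∧ r' < g.length ∧ c' < (g.getD r' []).length then v
      else pvGet2 g r' c' := by
  unfold pvGet2 pvSet2
  rw [PySem.List.pySetD_of_nonneg _ _ hr, PySem.List.pySetD_of_nonneg _ _ hc,
      PySem.List.pyGetD_of_nonneg _ _ hr, pvGetD_set]
  by_cases h1 : r.toNat = r' ∧ r' < g.length
  · rw [if_pos h1, pvGetD_set]
    obtain ⟨h1a, h1b⟩ := h1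
    subst h1a
    simp only [List.getD]
    split_ifs with h2 h3 h3 <;> try rfl
    · exfalso; apply h3; refine ⟨by omega, by omega, h1b, ?_⟩; simpa [List.getD] using h2.2
    · exfalso
      obtain ⟨ha, hb, hc', hd⟩ := h3
      apply h2
      constructor
      · omega
      · simpa [List.getD] using hd
  · rw [if_neg h1, if_neg]
    intro ⟨ha, hb, hc', hd⟩
    exact h1 ⟨by omega, hc'⟩

theorem length_pvSet2 (g : List (List Int)) (r c : Int) (v : Int) :
    (pvSet2 g r c v).length = g.length := by
  simp [pvSet2, PySem.List.length_pySetD]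

theorem length_pvApplyWrites (ps : List (Int × Int)) (v : Int) :
    ∀ (g : List (List Int)), (pvApplyWrites ps v g).length = g.length := by
  induction ps with
  | nil => intro g; rfl
  | cons p ps ih => intro g; rw [pvApplyWrites, List.foldl_cons, ← pvApplyWrites, ih, length_pvSet2]

theorem rowlen_pvApplyWrites (ps : List (Int × Int)) (v : Int)
    (hps : ∀ p ∈ ps, 0 ≤ p.1 ∧ 0 ≤ p.2) :
    ∀ (g : List (List Int)) (r' : Nat), ((pvApplyWrites ps v g).getD r' []).length = (g.getD r' []).length := by
  induction ps with
  | nil => intro g r'; rfl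
  | cons p ps ih =>
    intro g r'
    rw [pvApplyWrites, List.foldl_cons, ← pvApplyWrites,
        ih (fun q hq => hps q (List.mem_cons_of_mem _ hq)),
        rowlen_pvSet2 _ _ _ _ (hps p (List.mem_cons_self)).1]

theorem pvGet2_pvApplyWrites (v : Int) (ps : List (Int × Int))
    (hps : ∀ p ∈ ps, 0 ≤ p.1 ∧ 0 ≤ p.2) :
    ∀ (g : List (List Int)) (r' c' : Nat),
    pvGet2 (pvApplyWrites ps v g) r' c' =
      if (∃ p ∈ ps, p.1 = (r' : Int) ∧ p.2 = (c' : Int)) ∧ r' < g.length ∧ c' < (g.getD r' []).length then v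
      else pvGet2 g r' c' := by
  induction ps with
  | nil => intro g r' c'; simp [pvApplyWrites]
  | cons p ps ih =>
    intro g r' c'
    have hp := hps p (List.mem_cons_self)
    have hrest : ∀ q ∈ ps, 0 ≤ q.1 ∧ 0 ≤ q.2 := fun q hq => hps q (List.mem_cons_of_mem _ hq)
    rw [pvApplyWrites, List.foldl_cons, ← pvApplyWrites, ih hrest,
        length_pvSet2, rowlen_pvSet2 _ _ _ _ hp.1,
        pvGet2_pvSet2 _ _ _ _ hp.1 hp.2]
    by_cases hb : r' < g.length ∧ c' < (g.getD r' []).length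
    · by_cases hhit : p.1 = (r' : Int) ∧ p.2 = (c' : Int)
      · by_cases hrest2 : ∃ q ∈ ps, q.1 = (r' : Int) ∧ q.2 = (c' : Int)
        · rw [if_pos ⟨hrest2, hb⟩, if_pos ⟨⟨p, List.mem_cons_self, hhit⟩, hb⟩]
        · rw [if_neg (fun h => hrest2 h.1), if_pos ⟨hhit.1, hhit.2, hb⟩, if_pos ⟨⟨p, List.mem_cons_self, hhit⟩, hb⟩]
      · by_cases hrest2 : ∃ q ∈ ps, q.1 = (r' : Int) ∧ q.2 = (c' : Int)
        · rw [if_pos ⟨hrest2, hb⟩, if_pos ⟨⟨_, List.mem_cons_of_mem _ hrest2.choose_spec.1, hrest2.choose_spec.2⟩, hb⟩]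
        · rw [if_neg (fun h => hrest2 h.1), if_neg (by rintro ⟨h1, h2, _⟩; exact hhit ⟨h1, h2⟩),
             if_neg (by rintro ⟨⟨q, hq, hq2⟩, _⟩; rcases List.mem_cons.mp hq with h | h; exacts [hhit (h ▸ hq2), hrest2 ⟨q, h, hq2⟩])]
    · rw [if_neg (fun h => hb h.2), if_neg (fun h => hb ⟨h.2.2.1, h.2.2.2⟩), if_neg (fun h => hb h.2)]

theorem pvFindMarker_eq (row0 : List Int) (background : Int) :
    ∀ (n k : Nat), row0.length - k = n → k ≤ row0.length →
      pvFindMarker row0 background (PySem.List.pyRange k row0.length 1) =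
        (match (row0.drop k).findIdx? (fun v => v != background) with
         | none => (-1, -1)
         | some i => (((k + i : Nat) : Int), row0.getD (k + i) 0)) := by
  intro n
  induction n with
  | zero =>
    intro k hk hk2
    rw [PySem.List.pyRange_one_eq_nil (by omega), List.drop_of_length_le (by omega)]
    rfl
  | succ n ih =>
    intro k hk hk2
    have hklt : k < row0.length := by omega
    rw [PySem.List.pyRange_one_cons (by exact_mod_cast hklt)]
    have hdrop : row0.drop k = row0[k] :: row0.drop (k + 1) := List.drop_eq_getElem_cons hklt
    have hget : PySem.List.pyGetD row0 (k : Int) 0 = row0[k] := by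
      rw [PySem.List.pyGetD_of_nonneg _ _ (by omega)]
      simp [List.getD, List.getElem?_eq_getElem hklt]
    rw [pvFindMarker, hget, hdrop]
    by_cases hne : row0[k] = background
    · rw [if_neg (by simp [hne])]
      have hcast : ((k : Int) + 1) = ((k + 1 : Nat) : Int) := by push_cast; ring
      rw [hcast, ih (k + 1) (by omega) (by omega)]
      rw [List.findIdx?_cons]
      simp only [hne, bne_self_eq_false]
      cases hfi : (row0.drop (k+1)).findIdx? (fun v => v != background) with
      | none => simp
      | some i =>
        simp only [Option.map_some]
        have hadd : k + 1 + i = k + (i + 1) := by omega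
        simp [hadd]
    · rw [if_pos (by simpa using hne)]
      rw [List.findIdx?_cons]
      simp only [bne_iff_ne, ne_eq, hne, not_false_eq_true, if_pos]
      simp [List.getD, List.getElem?_eq_getElem hklt]

theorem pvFoldl_flatMap {α β : Type} (f : α → List β) (step : List (List Int) → β → List (List Int)) :
    ∀ (xs : List α) (init : List (List Int)),
      (xs.flatMap f).foldl step init = xs.foldl (fun a x => (f x).foldl step a) init := by
  intro xs
  induction xs with
  | nil => intro init; simp
  | cons x xs ih => intro init; simp [List.foldl_append, ih]

theorem pvPairFold (rows mc : Int) :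
    ∀ (xs : List Int) (l : List Int) (g : List (List Int)),
      xs.foldl (pvStripeStep rows mc) (l, g)
        = (l ++ xs, xs.foldl
            (fun g c => (PySem.List.pyRange 0 rows 1).foldl (fun res r => pvSet2 res r c mc) g) g) := by
  intro xs
  induction xs with
  | nil => intro l g; simp
  | cons x xs ih => intro l g; simp [pvStripeStep, ih]

theorem stripe_fold_eq (rows cols m mc : Int) (g : List (List Int)) :
    (PySem.List.pyRange m cols 2).foldl
        (fun g c => (PySem.List.pyRange 0 rows 1).foldl (fun res r => pvSet2 res r c mc) g) g
      = pvApplyWrites (pvStripeW rows cols m) mc g := by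
  rw [pvApplyWrites, pvStripeW, pvFoldl_flatMap]
  have hfun : (fun (a : List (List Int)) (c : Int) =>
      ((PySem.List.pyRange 0 rows 1).map (fun r => (r, c))).foldl (fun g p => pvSet2 g p.1 p.2 mc) a)
      = fun (g : List (List Int)) (c : Int) =>
        (PySem.List.pyRange 0 rows 1).foldl (fun res r => pvSet2 res r c mc) g := by
    funext a c
    rw [List.foldl_map]
  rw [hfun]

theorem cap_step_eq (rows cols mc : Int) (g : List (List Int)) (ic : Int × Int) :
    pvCapStep rows cols mc g ic = pvApplyWrites (pvCapS rows cols ic) mc g := by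
  unfold pvCapStep pvCapS
  split_ifs <;> simp_all [pvApplyWrites]

theorem cap_fold_eq (rows cols m mc : Int) (g : List (List Int)) :
    (PySem.List.enumerate (PySem.List.pyRange m cols 2)).foldl (pvCapStep rows cols mc) g
      = pvApplyWrites (pvCapW rows cols m) mc g := by
  rw [pvApplyWrites, pvCapW, pvFoldl_flatMap]
  have hfun : (fun (a : List (List Int)) (ic : Int × Int) =>
        (pvCapS rows cols ic).foldl (fun g p => pvSet2 g p.1 p.2 mc) a)
      = fun (res : List (List Int)) (ic : Int × Int) => pvCapStep rows cols mc res ic := by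
    funext a ic
    exact (cap_step_eq rows cols mc a ic).symm
  rw [hfun]

theorem pvApplyWrites_append (ps qs : List (Int × Int)) (v : Int) (g : List (List Int)) :
    pvApplyWrites (ps ++ qs) v g = pvApplyWrites qs v (pvApplyWrites ps v g) := by
  simp [pvApplyWrites, List.foldl_append]

theorem mem_pvStripeW (rows cols m : Int) (p : Int × Int) :
    p ∈ pvStripeW rows cols m ↔ (m ≤ p.2 ∧ p.2 < cols ∧ 2 ∣ p.2 - m) ∧ (0 ≤ p.1 ∧ p.1 < rows) := by
  simp only [pvStripeW, List.mem_flatMap, List.mem_map,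
    PySem.List.mem_pyRange_iff_of_pos (by norm_num : (0:Int) < 2), PySem.List.mem_pyRange_one]
  constructor
  · rintro ⟨c, ⟨h1, h2, h3⟩, r, ⟨h4, h5⟩, h6⟩
    cases h6; exact ⟨⟨h1, h2, h3⟩, h4, h5⟩
  · rintro ⟨⟨h1, h2, h3⟩, h4, h5⟩
    exact ⟨p.2, ⟨h1, h2, h3⟩, p.1, ⟨h4, h5⟩, rfl⟩

theorem mem_pvCapS (rows cols : Int) (i c : Int) (p : Int × Int) :
    p ∈ pvCapS rows cols (i, c) ↔
      i % 2 = 0 ∧ (p.1 = 0 ∨ p.1 = rows - 1) ∧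
        ((p.2 = c + 1 ∧ c + 1 < cols) ∨ (p.2 = c + 2 ∧ c + 2 < cols)) := by
  unfold pvCapS
  split_ifs <;> simp_all [Prod.ext_iff] <;> omega

theorem mem_pvCapW (rows cols m : Int) (hmc : m < cols) (p : Int × Int) :
    p ∈ pvCapW rows cols m ↔
      ∃ k : Nat, (k : Int) < (cols - m + 1) / 2 ∧ (k : Int) % 2 = 0 ∧
        (p.1 = 0 ∨ p.1 = rows - 1) ∧
        ((p.2 = m + 2 * k + 1 ∧ m + 2 * k + 1 < cols) ∨ (p.2 = m + 2 * k + 2 ∧ m + 2 * k + 2 < cols)) := by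
  rw [pvCapW, PySem.List.pyRange_of_pos m cols (by norm_num : (0:Int) < 2), if_pos hmc]
  simp only [List.mem_flatMap, PySem.List.mem_enumerate_iff, List.length_map, List.length_range]
  constructor
  · rintro ⟨ic, ⟨k, hk, hic⟩, hmem⟩
    subst hic
    rw [List.getElem_map, List.getElem_range] at hmem
    rw [zero_add] at hmem
    rw [mem_pvCapS] at hmem
    obtain ⟨he, hp1, hp2⟩ := hmem
    exact ⟨k, by omega, he, hp1, by omega⟩
  · rintro ⟨k, hk, he, hp1, hp2⟩
    refine ⟨((k : Int), m + 2 * k), ⟨k, by omega, ?_⟩, ?_⟩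
    · rw [List.getElem_map, List.getElem_range, zero_add]
    · rw [mem_pvCapS]; exact ⟨he, hp1, by omega⟩

theorem condiff (R C m r c : Int) (hmC : m < C) :
    ((m ≤ c ∧ c < C ∧ 2 ∣ c - m) ∨
      (∃ k : Nat, (k : Int) < (C - m + 1) / 2 ∧ (k : Int) % 2 = 0 ∧ (r = 0 ∨ r = R - 1) ∧
        ((c = m + 2 * k + 1 ∧ m + 2 * k + 1 < C) ∨ (c = m + 2 * k + 2 ∧ m + 2 * k + 2 < C))))
    ↔ ((0 ≤ c - m ∧ (c - m) % 2 = 0 ∧ c < C) ∨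
       ((r = 0 ∨ r = R - 1) ∧ 1 ≤ c - m ∧ (c - m - 1) % 4 = 0 ∧ c < C)) := by
  constructor
  · rintro (h | ⟨k, hk, hke, hr01, (⟨hc1, hb1⟩ | ⟨hc2, hb2⟩)⟩)
    · left; omega
    · right; exact ⟨hr01, by omega, by omega, by omega⟩
    · left; omega
  · rintro (h | ⟨hr01, h1, h4, hC⟩)
    · left; omega
    · right
      refine ⟨((c - m - 1) / 2).toNat, by omega, by omega, hr01, Or.inl ⟨by omega, by omega⟩⟩

theorem pyGetD_zero_headD (g : List (List Int)) : PySem.List.pyGetD g 0 [] = g.headD [] := by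
  rw [PySem.List.pyGetD_of_nonneg _ _ le_rfl]
  cases g <;> simp [List.getD]

theorem pyGetD_zero_headD' (l : List Int) : PySem.List.pyGetD l 0 0 = l.headD 0 := by
  rw [PySem.List.pyGetD_of_nonneg _ _ le_rfl]
  cases l <;> simp [List.getD]

theorem transform_eq_of_none (g : List (List Int))
    (hfi : (g.headD []).findIdx? (fun v => v != (g.headD []).headD 0) = none) :
    transform g = transform_alt g := by
  have hA : pvFindMarker (g.headD []) ((g.headD []).headD 0)
      (PySem.List.pyRange 0 ((g.headD [] : List Int).length : Int) 1) = (-1, -1) := by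
    have := pvFindMarker_eq (g.headD []) ((g.headD []).headD 0) (g.headD []).length 0 (by omega) (by omega)
    rw [List.drop_zero, hfi] at this
    exact this
  rw [transform, transform_alt]
  simp only [pyGetD_zero_headD, pyGetD_zero_headD', hA, hfi]
  simp

theorem pvExt2 (A B : List (List Int)) (hlen : A.length = B.length)
    (hrow : ∀ r < A.length, (A.getD r []).length = (B.getD r []).length)
    (hcell : ∀ r c, r < A.length → c < (A.getD r []).length →
      (A.getD r []).getD c 0 = (B.getD r []).getD c 0) : A = B := by
  apply List.ext_getElem hlen
  intro i h1 h2
  have hr := hrow i h1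
  rw [List.getD_eq_getElem _ _ h1, List.getD_eq_getElem _ _ h2] at hr
  apply List.ext_getElem hr
  intro j hj1 hj2
  have hc := hcell i j h1 (by rw [List.getD_eq_getElem _ _ h1]; exact hj1)
  rw [List.getD_eq_getElem _ _ h1, List.getD_eq_getElem _ _ h2,
      List.getD_eq_getElem _ _ hj1, List.getD_eq_getElem _ _ hj2] at hc
  exact hc

theorem getD_map_enumerate {α β : Type} (xs : List α) (f : Int × α → β) (dflt : β)
    (k : Nat) (hk : k < xs.length) :
    ((PySem.List.enumerate xs).map f).getD k dflt = f ((k : Int), xs[k]) := by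
  have hk2 : k < ((PySem.List.enumerate xs).map f).length := by
    simpa [PySem.List.length_enumerate] using hk
  rw [List.getD_eq_getElem _ _ hk2, List.getElem_map, PySem.List.getElem_enumerate, zero_add]

set_option maxHeartbeats 1000000 in
theorem transform_eq_of_some (g : List (List Int)) (mN : Nat)
    (hfi : (g.headD []).findIdx? (fun v => v != (g.headD []).headD 0) = some mN) :
    transform g = transform_alt g := by
  have hgne : g ≠ [] := by intro h; subst h; simp at hfi
  have hmlt : mN < (g.headD []).length := (List.findIdx?_eq_some_iff_findIdx_eq.mp hfi).1
  have hglen : 0 < g.length := by cases g; exacts [absurd rfl hgne, by simp]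
  have hA : pvFindMarker (g.headD []) ((g.headD []).headD 0)
      (PySem.List.pyRange 0 ((g.headD [] : List Int).length : Int) 1)
      = ((mN : Int), (g.headD []).getD mN 0) := by
    have := pvFindMarker_eq (g.headD []) ((g.headD []).headD 0) (g.headD []).length 0 (by omega) (by omega)
    rw [List.drop_zero, hfi] at this
    simpa using this
  have hW : ∀ p ∈ pvStripeW (g.length : Int) ((g.headD [] : List Int).length : Int) (mN : Int) ++
      pvCapW (g.length : Int) ((g.headD [] : List Int).length : Int) (mN : Int), 0 ≤ p.1 ∧ 0 ≤ p.2 := by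
    intro p hp
    rcases List.mem_append.mp hp with h | h
    · rw [mem_pvStripeW] at h
      constructor <;> omega
    · rw [mem_pvCapW _ _ _ (by exact_mod_cast hmlt)] at h
      obtain ⟨k, _, _, h1, h2⟩ := h
      constructor <;> omega
  have hAeq : transform g =
      pvApplyWrites
        (pvStripeW (g.length : Int) ((g.headD [] : List Int).length : Int) (mN : Int) ++
         pvCapW (g.length : Int) ((g.headD [] : List Int).length : Int) (mN : Int))
        ((g.headD []).getD mN 0) g := by
    rw [transform]
    simp only [pyGetD_zero_headD, pyGetD_zero_headD', hA]
    rw [if_neg (by simp)]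
    rw [pvPairFold]
    simp only [List.nil_append]
    rw [stripe_fold_eq, cap_fold_eq, ← pvApplyWrites_append]
  have hBeq : transform_alt g = (PySem.List.enumerate g).map (fun rrow =>
      (PySem.List.enumerate rrow.2).map (fun cv =>
        if 0 ≤ cv.1 - (mN : Int) ∧ (cv.1 - (mN : Int)) % 2 = 0 ∧ cv.1 < ((g.headD [] : List Int).length : Int) then (g.headD []).getD mN 0
        else if (rrow.1 = 0 ∨ rrow.1 = (g.length : Int) - 1) ∧ 1 ≤ cv.1 - (mN : Int) ∧
            (cv.1 - (mN : Int) - 1) % 4 = 0 ∧ cv.1 < ((g.headD [] : List Int).length : Int) then (g.headD []).getD mN 0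
        else cv.2)) := by
    rw [transform_alt]
    simp only [hfi]
  rw [hAeq, hBeq]
  apply pvExt2
  · rw [length_pvApplyWrites]
    simp [PySem.List.length_enumerate]
  · intro r hr
    rw [length_pvApplyWrites] at hr
    rw [rowlen_pvApplyWrites _ _ hW,
        getD_map_enumerate _ _ _ _ hr,
        List.getD_eq_getElem _ _ hr]
    simp [PySem.List.length_enumerate]
  · intro r c hr hc
    rw [length_pvApplyWrites] at hr
    rw [rowlen_pvApplyWrites _ _ hW] at hc
    have hcell := pvGet2_pvApplyWrites ((g.headD []).getD mN 0) _ hW g r c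
    rw [pvGet2] at hcell
    rw [hcell]
    have hgr : g.getD r [] = g[r] := List.getD_eq_getElem _ _ hr
    have hc' : c < g[r].length := by rwa [hgr] at hc
    rw [getD_map_enumerate _ _ _ _ hr]
    simp only []
    rw [getD_map_enumerate _ _ _ _ hc']
    simp only []
    have hmC : (mN : Int) < ((g.headD [] : List Int).length : Int) := by exact_mod_cast hmlt
    have hPiff : ((∃ p ∈ pvStripeW (g.length : Int) ((g.headD [] : List Int).length : Int) (mN : Int) ++
          pvCapW (g.length : Int) ((g.headD [] : List Int).length : Int) (mN : Int),
          p.1 = (r : Int) ∧ p.2 = (c : Int)) ∧ r < g.length ∧ c < (g.getD r []).length) ↔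
        ((0 ≤ (c : Int) - (mN : Int) ∧ ((c : Int) - (mN : Int)) % 2 = 0 ∧ (c : Int) < ((g.headD [] : List Int).length : Int)) ∨
         (((r : Int) = 0 ∨ (r : Int) = (g.length : Int) - 1) ∧ 1 ≤ (c : Int) - (mN : Int) ∧
          ((c : Int) - (mN : Int) - 1) % 4 = 0 ∧ (c : Int) < ((g.headD [] : List Int).length : Int))) := by
      rw [and_iff_left ⟨hr, hc⟩]
      rw [← condiff (g.length : Int) _ _ _ _ hmC]
      constructor
      · rintro ⟨p, hp, h1, h2⟩
        rcases List.mem_append.mp hp with h | h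
        · left
          rw [mem_pvStripeW] at h
          omega
        · right
          rw [mem_pvCapW _ _ _ hmC] at h
          obtain ⟨k, hk1, hk2, hk3, hk4⟩ := h
          refine ⟨k, hk1, hk2, ?_, ?_⟩ <;> omega
      · rintro (h | ⟨k, hk1, hk2, hk3, hk4⟩)
        · exact ⟨((r : Int), (c : Int)), List.mem_append.mpr (Or.inl (by rw [mem_pvStripeW]; constructor <;> constructor <;> omega)), rfl, rfl⟩
        · exact ⟨((r : Int), (c : Int)), List.mem_append.mpr (Or.inr (by rw [mem_pvCapW _ _ _ hmC]; exact ⟨k, hk1, hk2, by omega, by omega⟩)), rfl, rfl⟩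
    by_cases h1 : (0 ≤ (c : Int) - (mN : Int) ∧ ((c : Int) - (mN : Int)) % 2 = 0 ∧ (c : Int) < ((g.headD [] : List Int).length : Int))
    · rw [if_pos (hPiff.mpr (Or.inl h1)), if_pos h1]
    · by_cases h2 : (((r : Int) = 0 ∨ (r : Int) = (g.length : Int) - 1) ∧ 1 ≤ (c : Int) - (mN : Int) ∧
          ((c : Int) - (mN : Int) - 1) % 4 = 0 ∧ (c : Int) < ((g.headD [] : List Int).length : Int))
      · rw [if_pos (hPiff.mpr (Or.inr h2)), if_neg h1, if_pos h2]
      · rw [if_neg (fun hp => (hPiff.mp hp).elim h1 h2), if_neg h1, if_neg h2, pvGet2, hgr, List.getD_eq_getElem _ _ hc']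

-- ===== VERDICT (by name: the statement is the Claim_ definition above) =====
theorem transform_spec : Claim_equal_transform := by
  unfold Claim_equal_transform Spec_transform
  intro g _ _
  cases hfi : (g.headD []).findIdx? (fun v => v != (g.headD []).headD 0) with
  | none => exact transform_eq_of_none g hfi
  | some mN => exact transform_eq_of_some g mN hfi
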